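-- pv_equiv track=rewrite | github.com/dikoko/practice | 1 Numerics/1-06_nth_removal.py | new_nums_bf
-- ===== SOURCE A (Python) =====
-- def new_nums_bf(N):
--     num = 0
--     while N != 0:
--         num += 1
--         if '9' in str(num):
--             continue
--         N -= 1
--
--     return num
-- ===== SOURCE B (Python) =====
-- def new_nums_bf(N):
--     # N-th positive integer containing no digit 9 = N written in base 9, digits read as decimal.
--     num = 0
--     p = 1
--     while N > 0:
--         num += (N % 9) * p
--         N //= 9
--         p *= 10
--     return num
-- ===== Notes on version B (the rewrite author's own statement) =====
-- stated objective: faster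
-- what changed: Replaces the count-up loop that tests every integer's decimal string for a '9' with a closed-form base conversion: write N in base 9 and read its digits as a decimal number.
-- outside the precondition, e.g. on new_nums_bf(-1): A does not finish within the time limit, B returns 0
import Mathlib
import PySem

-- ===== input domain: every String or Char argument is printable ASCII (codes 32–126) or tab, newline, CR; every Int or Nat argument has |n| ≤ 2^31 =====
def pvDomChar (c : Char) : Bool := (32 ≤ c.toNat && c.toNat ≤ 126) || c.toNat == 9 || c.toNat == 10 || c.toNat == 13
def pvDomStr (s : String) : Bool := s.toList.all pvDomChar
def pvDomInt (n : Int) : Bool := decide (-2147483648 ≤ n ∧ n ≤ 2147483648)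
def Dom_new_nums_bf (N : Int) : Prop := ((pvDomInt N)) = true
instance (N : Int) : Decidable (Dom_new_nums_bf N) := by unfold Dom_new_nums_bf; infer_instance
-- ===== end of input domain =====

-- ===== PORT A =====
-- B replaces A's count-up-and-test-decimal-string loop with a base-9 conversion (objective: faster).
-- Port of A's while loop; the fuel N*N+1 only makes the recursion total and is proved sufficient below.
def newNumsLoop : Nat → Int → Int → Int
  | 0, num, _ => num
  | fuel+1, num, n =>
    if n = 0 then num
    else if PySem.Str.isIn "9" (PySem.Int.toStr (num + 1)) then newNumsLoop fuel (num + 1) n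
    else newNumsLoop fuel (num + 1) (n - 1)

def new_nums_bf (N : Int) : Int := newNumsLoop (N.toNat * N.toNat + 1) 0 N

-- ===== PORT B =====
def altLoop (N p num : Int) : Int :=
  if _h : 0 < N then altLoop (PySem.Int.floordiv N 9) (p * 10) (num + PySem.Int.mod N 9 * p)
  else num
termination_by N.toNat
decreasing_by
  have h9 : PySem.Int.floordiv N 9 = N / 9 := PySem.Int.floordiv_eq_ediv_of_pos (by omega)
  rw [h9]; omega

def new_nums_bf_alt (N : Int) : Int := altLoop N 1 0

-- ===== PRECONDITION & SPEC =====
-- Pre_ excludes N < 0, on which A's while loop never terminates (N only gets more negative).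
def Pre_new_nums_bf (N : Int) : Prop := 0 ≤ N
instance (N : Int) : Decidable (Pre_new_nums_bf N) := by unfold Pre_new_nums_bf; infer_instance
def pvWitness_new_nums_bf : Int := (10)
def Spec_new_nums_bf (N : Int) (out : Int) : Prop := out = new_nums_bf_alt N
instance (N : Int) (out : Int) : Decidable (Spec_new_nums_bf N out) := by unfold Spec_new_nums_bf; infer_instance

-- ===== CLAIM (what is proved, stated in full; the proofs are below) =====
def Claim_equal_new_nums_bf : Prop := ∀ (N : Int), Dom_new_nums_bf N → Pre_new_nums_bf N → Spec_new_nums_bf N (new_nums_bf N)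

-- ===== LEMMAS AND PROOFS =====

-- e n = n written in base 9, read as a decimal number (the common spec of both ports).
def e (n : Nat) : Nat :=
  if h : n = 0 then 0 else 10 * e (n / 9) + n % 9
termination_by n
decreasing_by exact Nat.div_lt_self (Nat.pos_of_ne_zero h) (by omega)

lemma e_zero : e 0 = 0 := by rw [e]; norm_num

lemma e_eq (n : Nat) : e n = 10 * e (n / 9) + n % 9 := by
  rw [e]
  split
  · subst ‹n = 0›; rw [e_zero]
  · rfl

-- decimal digit-9 test, arithmetically
def has9 (n : Nat) : Bool :=
  (n % 10 == 9) || (if h : n < 10 then false else has9 (n / 10))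
termination_by n
decreasing_by exact Nat.div_lt_self (by omega) (by omega)

lemma e_lt_succ (k : Nat) : e k < e (k + 1) := by
  induction k using Nat.strong_induction_on with
  | _ k ih =>
    by_cases h8 : k % 9 = 8
    · have hk : 8 ≤ k := by omega
      have h1 : (k + 1) / 9 = k / 9 + 1 := by omega
      have h2 : (k + 1) % 9 = 0 := by omega
      have ihq := ih (k / 9) (Nat.div_lt_self (by omega) (by omega))
      rw [e_eq (k + 1), e_eq k, h1, h2, h8]
      omega
    · have h1 : (k + 1) / 9 = k / 9 := by omega
      have h2 : (k + 1) % 9 = k % 9 + 1 := by omega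
      rw [e_eq (k + 1), e_eq k, h1, h2]
      omega

lemma e_strictMono : StrictMono e := strictMono_nat_of_lt_succ e_lt_succ

lemma e_free9 (n : Nat) : has9 (e n) = false := by
  induction n using Nat.strong_induction_on with
  | _ n ih =>
    rcases Nat.eq_zero_or_pos n with h0 | hpos
    · subst h0; rw [e_zero, has9]; decide
    · have hr : n % 9 < 9 := Nat.mod_lt _ (by omega)
      have heq := e_eq n
      rw [has9]
      have hm10 : e n % 10 = n % 9 := by omega
      have hd10 : e n / 10 = e (n / 9) := by omega
      simp only [hm10, hd10]
      have : ¬ (n % 9 == 9) = true := by simp; omega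
      split
      · simp; omega
      · simp only [Bool.or_eq_false_iff]
        exact ⟨by simp; omega, ih (n / 9) (Nat.div_lt_self hpos (by omega))⟩

-- every number strictly between two consecutive 9-free numbers e k, e (k+1) has a digit 9
lemma gap_has9 : ∀ k m, e k < m → m < e (k + 1) → has9 m = true := by
  intro k
  induction k using Nat.strong_induction_on with
  | _ k ih =>
    intro m h1 h2
    by_cases h8 : k % 9 = 8
    · have hk : 8 ≤ k := by omega
      have ha : (k + 1) / 9 = k / 9 + 1 := by omega
      have hb : (k + 1) % 9 = 0 := by omega
      rw [e_eq k, h8] at h1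
      rw [e_eq (k + 1), ha, hb] at h2
      set a := e (k / 9) with hadef
      set b := e (k / 9 + 1) with hbdef
      -- 10*a + 8 < m < 10*b
      have hq : a ≤ m / 10 ∧ m / 10 < b := by omega
      by_cases hqa : m / 10 = a
      · have hr9 : m % 10 = 9 := by omega
        rw [has9]
        have : ¬ m < 10 ∨ m < 10 := by omega
        simp [hr9]
      · have haq : a < m / 10 := by omega
        have hq9 := ih (k / 9) (Nat.div_lt_self (by omega) (by omega)) (m / 10) haq hq.2
        rw [has9]
        have hm10 : ¬ m < 10 := by omega
        simp [hm10, hq9]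
    · have ha : (k + 1) / 9 = k / 9 := by omega
      have hb : (k + 1) % 9 = k % 9 + 1 := by omega
      rw [e_eq (k + 1), ha, hb] at h2
      rw [e_eq k] at h1
      omega

lemma digitChar_eq_nine (r : Nat) (h : r < 10) : ((r.digitChar = '9') ↔ r = 9) := by
  interval_cases r <;> simp [Nat.digitChar]

lemma mem9_toDigitsCore :
    ∀ fuel n ds, n < fuel →
      ('9' ∈ Nat.toDigitsCore 10 fuel n ds ↔ (has9 n = true ∨ '9' ∈ ds)) := by
  intro fuel
  induction fuel with
  | zero => intro n ds h; omega
  | succ fuel ih =>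
    intro n ds h
    rw [has9]
    simp only [Nat.toDigitsCore]
    by_cases h0 : n / 10 = 0
    · have hn : n < 10 := by omega
      have hm : n % 10 = n := by omega
      simp only [h0, if_pos, List.mem_cons]
      simp [hn, hm]
      rw [show ('9' = n.digitChar) ↔ n = 9 from by rw [eq_comm, digitChar_eq_nine n hn]]
    · have hn : ¬ n < 10 := by omega
      rw [if_neg h0]
      rw [ih (n / 10) _ (by omega)]
      simp [hn, List.mem_cons]
      rw [show ('9' = (n % 10).digitChar) ↔ n % 10 = 9 from by
        rw [eq_comm, digitChar_eq_nine _ (by omega)]]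
      tauto

lemma nine_mem_toStr (m : Nat) :
    PySem.Str.isIn "9" (PySem.Int.toStr (m : Int)) = has9 m := by
  have h1 : PySem.Str.isIn "9" (PySem.Int.toStr (m : Int)) = true ↔ has9 m = true := by
    rw [PySem.Str.isIn_iff_infix, PySem.Int.toList_toStr]
    have : PySem.Int.toChars (m : Int) = Nat.toDigits 10 m := by
      simp [PySem.Int.toChars]
    rw [this]
    have h9 : ("9" : String).toList = ['9'] := by decide
    rw [h9, List.singleton_infix_iff]
    unfold Nat.toDigits
    rw [mem9_toDigitsCore (m + 1) m [] (by omega)]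
    simp
  cases hh : has9 m
  · simp [hh] at h1; simp [h1]
  · simp [hh] at h1; simp [h1]

lemma loop_zero (fuel : Nat) (m : Int) : newNumsLoop fuel m 0 = m := by
  cases fuel <;> simp [newNumsLoop]

lemma loop_gap :
    ∀ fuel k n m, 0 < n → e k ≤ m → m < e (k + 1) → e (k + n) ≤ m + fuel →
      newNumsLoop fuel (m : Int) (n : Int) = (e (k + n) : Int) := by
  intro fuel
  induction fuel with
  | zero =>
    intro k n m hn h1 h2 h3
    exfalso
    have : e (k + 1) ≤ e (k + n) := e_strictMono.monotone (by omega)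
    omega
  | succ fuel ih =>
    intro k n m hn h1 h2 h3
    have hn0 : ¬ ((n : Int) = 0) := by exact_mod_cast Nat.pos_iff_ne_zero.mp hn
    have hcast : (m : Int) + 1 = ((m + 1 : Nat) : Int) := by push_cast; ring
    rw [newNumsLoop, if_neg hn0, hcast, nine_mem_toStr]
    by_cases hedge : m + 1 = e (k + 1)
    · rw [hedge, e_free9]
      simp only [Bool.false_eq_true, if_false]
      rcases Nat.eq_or_lt_of_le hn with h1' | h1'
      · -- n = 1
        have hn1 : n = 1 := by omega
        subst hn1
        have hz : ((1 : Nat) : Int) - 1 = 0 := by norm_num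
        rw [hz, loop_zero]
      · -- n ≥ 2
        have hsub : ((n : Nat) : Int) - 1 = ((n - 1 : Nat) : Int) := by omega
        have hke : k + 1 + (n - 1) = k + n := by omega
        have hrec := ih (k + 1) (n - 1) (e (k + 1)) (by omega) (le_refl _)
          (e_lt_succ (k + 1)) (by rw [hke]; omega)
        rw [hke] at hrec
        rw [hsub, hrec]
    · have hlt : m + 1 < e (k + 1) := by omega
      have h9 : has9 (m + 1) = true := gap_has9 k (m + 1) (by omega) hlt
      rw [h9]
      simp only [if_true]
      exact ih k n (m + 1) hn (by omega) hlt (by omega)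

lemma alt_eq (n : Nat) : ∀ p num : Int, altLoop (n : Int) p num = num + p * (e n : Int) := by
  induction n using Nat.strong_induction_on with
  | _ n ih =>
    intro p num
    rcases Nat.eq_zero_or_pos n with h0 | hpos
    · subst h0
      rw [altLoop, e_zero]
      norm_num
    · have hpos' : (0 : Int) < (n : Int) := by exact_mod_cast hpos
      rw [altLoop, dif_pos hpos']
      have hfd : PySem.Int.floordiv (n : Int) 9 = ((n / 9 : Nat) : Int) := by
        exact_mod_cast PySem.Int.floordiv_natCast n 9
      have hmd : PySem.Int.mod (n : Int) 9 = ((n % 9 : Nat) : Int) := by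
        exact_mod_cast PySem.Int.mod_natCast n 9
      rw [hfd, hmd, ih (n / 9) (Nat.div_lt_self hpos (by omega))]
      rw [e_eq n]
      push_cast
      ring

lemma e_le_sq (n : Nat) (h : 1 ≤ n) : e n ≤ n * n := by
  induction n using Nat.strong_induction_on with
  | _ n ih =>
    rcases Nat.lt_or_ge n 9 with hlt | hge
    · rw [e_eq n]
      have : n / 9 = 0 := by omega
      rw [this, e_zero]
      have : n % 9 = n := by omega
      nlinarith
    · have hq1 : 1 ≤ n / 9 := by omega
      have hqlt : n / 9 < n := Nat.div_lt_self (by omega) (by omega)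
      have hb := ih (n / 9) hqlt hq1
      rw [e_eq n]
      have h9 : 9 * (n / 9) ≤ n := by omega
      have hsq : 81 * ((n / 9) * (n / 9)) ≤ n * n := by
        calc 81 * ((n / 9) * (n / 9)) = (9 * (n / 9)) * (9 * (n / 9)) := by ring
        _ ≤ n * n := Nat.mul_le_mul h9 h9
      have hmod : n % 9 < 9 := Nat.mod_lt _ (by omega)
      nlinarith

-- ===== VERDICT (by name: the statement is the Claim_ definition above) =====
theorem new_nums_bf_spec : Claim_equal_new_nums_bf := by
  intro N _ hpre
  have h0N : 0 ≤ N := hpre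
  unfold Spec_new_nums_bf new_nums_bf new_nums_bf_alt
  obtain ⟨n, rfl⟩ : ∃ n : Nat, N = (n : Int) := ⟨N.toNat, by omega⟩
  rw [Int.toNat_natCast, alt_eq n 1 0]
  norm_num
  rcases Nat.eq_zero_or_pos n with h0 | hpos
  · subst h0
    simp [loop_zero, e_zero]
  · have he1 : e 1 = 1 := by rw [e_eq 1]; norm_num [e_zero]
    have := loop_gap (n * n + 1) 0 n 0 hpos (by rw [e_zero]) (by rw [he1]; omega)
      (by have := e_le_sq n hpos; simp only [Nat.zero_add]; omega)
    simpa using this
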